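-- pv_equiv track=rewrite | github.com/SEDevSys/StructGen | utils.py | clean_java_comments
-- ===== SOURCE A (Python) =====
-- def clean_java_comments(java_code: str) -> str:
--     lines = java_code.split("\n")
--     result_lines = []
--
--     i = 0
--     while i < len(lines):
--         line = lines[i].strip()
--
--         if not line:
--             result_lines.append(lines[i])
--             i += 1
--             continue
--
--         if line.startswith("/**"):
--             comment_lines = []
--             comment_lines.append(lines[i])
--             i += 1
--
--             while i < len(lines) and "*/" not in lines[i]:
--                 comment_lines.append(lines[i])
--                 i += 1
--
--             if i < len(lines) and "*/" in lines[i]: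
--                 comment_lines.append(lines[i])
--                 if is_valid_block_comment(comment_lines):
--                     result_lines.extend(comment_lines)
--                 i += 1
--             continue
--
--         if line.startswith("//"):
--             result_lines.append(lines[i])
--             i += 1
--             continue
--
--         if "*/" in line and not any(
--             l.strip().startswith("/**") for l in result_lines[-5:]
--         ):
--             i += 1
--             continue
--
--         if line.startswith("*") and not any(
--             l.strip().startswith("/**") for l in result_lines[-5:]
--         ):
--             i += 1
--             continue
--
--         result_lines.append(lines[i])
--         i += 1
--
--     return "\n".join(result_lines)
--
-- def is_valid_block_comment(comment_lines: list) -> bool: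
--     if not comment_lines:
--         return False
--
--     if not comment_lines[0].strip().startswith("/**"):
--         return False
--
--     if not comment_lines[-1].strip().endswith("*/"):
--         return False
--
--     for line in comment_lines[1:-1]:
--         stripped = line.strip()
--         if not stripped.startswith("*"):
--             return False
--
--     return True
-- ===== SOURCE B (Python) =====
-- def clean_java_comments(java_code: str) -> str:
--     result = []
--     gap = 5          # emitted lines since the last emitted '/**' line, capped at 5
--     buf = None       # the '/**' block currently being buffered, else None
--     mid_ok = True    # have all interior lines of buf started with '*'?
--     for raw in java_code.split("\n"):
--         s = raw.strip()
--         if buf is not None: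
--             buf.append(raw)
--             if "*/" in raw:
--                 if mid_ok and s.endswith("*/"):
--                     result += buf
--                     for l in buf:
--                         gap = 0 if l.strip().startswith("/**") else min(gap + 1, 5)
--                 buf = None
--             else:
--                 mid_ok = mid_ok and s.startswith("*")
--         elif s.startswith("/**"):
--             buf = [raw]
--             mid_ok = True
--         elif not s or s.startswith("//"):
--             result.append(raw)
--             gap = min(gap + 1, 5)
--         elif ("*/" in s or s.startswith("*")) and gap >= 5:
--             pass
--         else:
--             result.append(raw)
--             gap = min(gap + 1, 5)
--     return "\n".join(result)
-- ===== Notes on version B (the rewrite author's own statement) =====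
-- stated objective: alternative
-- what changed: B drops the is_valid_block_comment post-validation pass and the result[-5:] tail rescans: block validity is decided incrementally by a running mid_ok flag while the block is buffered, and the five-line '/**' lookback is replaced by a capped gap counter maintained as lines are emitted, in a single state-machine pass instead of an index pointer with inner while-loops.
import Mathlib
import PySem

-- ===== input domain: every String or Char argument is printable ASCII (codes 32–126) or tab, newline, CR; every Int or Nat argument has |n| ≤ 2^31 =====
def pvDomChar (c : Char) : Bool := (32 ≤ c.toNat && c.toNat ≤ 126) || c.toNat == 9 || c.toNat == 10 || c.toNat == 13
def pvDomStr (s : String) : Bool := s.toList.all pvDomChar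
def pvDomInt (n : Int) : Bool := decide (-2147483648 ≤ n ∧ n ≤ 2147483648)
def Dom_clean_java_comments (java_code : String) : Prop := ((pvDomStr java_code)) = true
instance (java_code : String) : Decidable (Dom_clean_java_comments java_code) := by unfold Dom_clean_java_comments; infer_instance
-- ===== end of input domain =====

-- B eliminates A's is_valid_block_comment post-pass and the result[-5:] rescans: validity of a
-- block is decided incrementally by a running flag while it is buffered, and the five-line
-- '/**' lookback becomes a capped gap counter updated as lines are emitted (objective: alternative).

-- ===== PORT A =====
-- A's helper is_valid_block_comment
def pvValidBlock (comment_lines : List String) : Bool :=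
  if comment_lines = [] then false
  else if !(PySem.Str.startswith (PySem.Str.strip (comment_lines.headD "")) "/**") then false
  else if !(PySem.Str.endswith (PySem.Str.strip (comment_lines.getLastD "")) "*/") then false
  else (PySem.List.slice comment_lines (some 1) (some (-1))).all
        (fun l => PySem.Str.startswith (PySem.Str.strip l) "*")

-- inner while of A: collect lines until one contains "*/"
def pvInnerA (comment : List String) : List String → (List String × List String)
  | [] => (comment, [])
  | l :: rest =>
    if PySem.Str.isIn "*/" l then (comment, l :: rest)
    else pvInnerA (comment ++ [l]) rest

theorem pvInnerA_snd_length (comment : List String) (ls : List String) :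
    (pvInnerA comment ls).2.length ≤ ls.length := by
  induction ls generalizing comment with
  | nil => simp [pvInnerA]
  | cons l rest ih =>
    simp only [pvInnerA]
    split
    · simp
    · exact le_trans (ih _) (by simp)

-- A's lookback: any of result_lines[-5:] strips to a '/**' start
def pvLook (acc : List String) : Bool :=
  (PySem.List.slice acc (some (-5)) none).any
    (fun x => PySem.Str.startswith (PySem.Str.strip x) "/**")

def pvLoopA (acc : List String) (ls : List String) : List String :=
  match ls with
  | [] => acc
  | l :: rest =>
    let s := PySem.Str.strip l
    if s = "" then pvLoopA (acc ++ [l]) rest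
    else if PySem.Str.startswith s "/**" then
      match h : pvInnerA [l] rest with
      | (_, []) => acc
      | (c, hd :: t) =>
        pvLoopA (if pvValidBlock (c ++ [hd]) then acc ++ (c ++ [hd]) else acc) t
    else if PySem.Str.startswith s "//" then pvLoopA (acc ++ [l]) rest
    else if PySem.Str.isIn "*/" s && !(pvLook acc) then pvLoopA acc rest
    else if PySem.Str.startswith s "*" && !(pvLook acc) then pvLoopA acc rest
    else pvLoopA (acc ++ [l]) rest
termination_by ls.length
decreasing_by
  all_goals try simp
  all_goals (have := pvInnerA_snd_length [l] rest; rw [h] at this; simp at this ⊢; omega)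

def clean_java_comments (java_code : String) : String :=
  PySem.Str.join "\n" (pvLoopA [] ((PySem.Str.split? java_code "\n").getD []))

-- ===== PORT B =====
-- gap update per emitted line: 0 on a '/**' line, else capped increment (body of Source B's for-l-in-buf loop)
def pvUpd (g : Nat) (l : String) : Nat :=
  if PySem.Str.startswith (PySem.Str.strip l) "/**" then 0 else min (g + 1) 5

-- state: (result, gap, buffered block with its running mid_ok flag)
def pvStepB (st : List String × Nat × Option (List String × Bool)) (raw : String) :
    List String × Nat × Option (List String × Bool) :=
  let s := PySem.Str.strip raw
  match st with
  | (result, gap, some (buf, midOk)) =>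
    let buf' := buf ++ [raw]
    if PySem.Str.isIn "*/" raw then
      if midOk && PySem.Str.endswith s "*/" then
        (result ++ buf', buf'.foldl pvUpd gap, none)
      else (result, gap, none)
    else (result, gap, some (buf', midOk && PySem.Str.startswith s "*"))
  | (result, gap, none) =>
    if PySem.Str.startswith s "/**" then (result, gap, some ([raw], true))
    else if s = "" || PySem.Str.startswith s "//" then (result ++ [raw], min (gap + 1) 5, none)
    else if (PySem.Str.isIn "*/" s || PySem.Str.startswith s "*") && decide (5 ≤ gap) then
      (result, gap, none)
    else (result ++ [raw], min (gap + 1) 5, none)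

def clean_java_comments_alt (java_code : String) : String :=
  PySem.Str.join "\n"
    ((((PySem.Str.split? java_code "\n").getD []).foldl pvStepB ([], 5, none)).1)

-- ===== PRECONDITION & SPEC =====
def Spec_clean_java_comments (java_code : String) (out : String) : Prop := out = clean_java_comments_alt java_code
instance (java_code : String) (out : String) : Decidable (Spec_clean_java_comments java_code out) := by unfold Spec_clean_java_comments; infer_instance

-- ===== CLAIM (what is proved, stated in full; the proofs are below) =====
def Claim_equal_clean_java_comments : Prop := ∀ (java_code : String), Dom_clean_java_comments java_code → Spec_clean_java_comments java_code (clean_java_comments java_code)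

-- ===== LEMMAS AND PROOFS =====

-- the gap value B maintains, as a function of the emitted lines
def pvGFold (res : List String) : Nat := res.foldl pvUpd 5

theorem pvInnerA_shift (ls : List String) : ∀ (b : List String),
    pvInnerA b ls = (b ++ (pvInnerA [] ls).1, (pvInnerA [] ls).2) := by
  induction ls with
  | nil => intro b; simp [pvInnerA]
  | cons l rest ih =>
    intro b
    simp only [pvInnerA, List.nil_append]
    split
    · simp
    · rw [ih (b ++ [l]), ih [l]]; simp

-- gap window: gap < k iff one of the last k emitted lines starts with '/**'
theorem pvGFold_window (xs : List String) : ∀ (k : Nat), k ≤ 5 →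
    decide (pvGFold xs < k) =
      (xs.drop (xs.length - k)).any (fun x => PySem.Str.startswith (PySem.Str.strip x) "/**") := by
  induction xs using List.reverseRecOn with
  | nil => intro k hk; simp [pvGFold]; omega
  | append_singleton xs l ih =>
    intro k hk
    rw [pvGFold, List.foldl_append] at *
    match k with
    | 0 =>
      have h0 : xs.length + 1 - 0 = xs.length + 1 := by omega
      simp [h0, List.drop_eq_nil_of_le]
    | k' + 1 =>
      have hlen : xs.length + 1 - (k' + 1) ≤ xs.length := by omega
      rw [List.length_append, List.length_singleton,
        List.drop_append_of_le_length hlen, List.any_append]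
      have harith : xs.length + 1 - (k' + 1) = xs.length - k' := by omega
      rw [harith]
      simp only [List.foldl_cons, List.foldl_nil, pvUpd]
      split
      · next hst =>
        have hst' : PySem.Chars.startswith (PySem.Chars.strip l.toList) ['/', '*', '*'] = true := by
          simpa using hst
        simp [hst']
      · next hst =>
        have := ih k' (by omega)
        simp only [List.any_cons, List.any_nil, hst, Bool.or_false, ← this,
          decide_eq_decide]
        omega

theorem pvLook_eq_gap (res : List String) : pvLook res = decide (pvGFold res < 5) := by
  rw [pvLook, PySem.List.slice_from_neg_ofNat res 5 (by omega), pvGFold_window res 5 le_rfl]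

-- a line starting with '//' does not start with '/**'
theorem pvSlash_not_doc {s : String} (h : PySem.Str.startswith s "//" = true) :
    PySem.Str.startswith s "/**" = false := by
  simp only [PySem.Str.startswith_eq] at h ⊢
  rw [PySem.Chars.startswith_iff] at h
  obtain ⟨t, ht⟩ := h
  rw [Bool.eq_false_iff]
  intro hcon
  rw [PySem.Chars.startswith_iff] at hcon
  obtain ⟨u, hu⟩ := hcon
  rw [← ht] at hu
  have h2 : ("/**" : String).toList = ['/', '*', '*'] := rfl
  have h3 : ("//" : String).toList = ['/', '/'] := rfl
  rw [h2, h3] at hu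
  simp at hu

-- a valid block's shape, incrementally: middles all '*', last line ends '*/'
theorem pvValidBlock_char (l hd : String) (ms : List String)
    (hl : PySem.Str.startswith (PySem.Str.strip l) "/**" = true) :
    pvValidBlock ((l :: ms) ++ [hd]) =
      (ms.all (fun x => PySem.Str.startswith (PySem.Str.strip x) "*") &&
        PySem.Str.endswith (PySem.Str.strip hd) "*/") := by
  have hsl : PySem.List.slice ((l :: ms) ++ [hd]) (some 1) (some (-1)) = ms := by
    simp only [PySem.List.slice]
    cases ms with
    | nil => simp
    | cons a t => simp
  rw [pvValidBlock, if_neg (show ¬((l :: ms) ++ [hd] = []) by simp),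
    show ((l :: ms) ++ [hd]).headD "" = l from rfl, hl,
    show ((l :: ms) ++ [hd]).getLastD "" = hd from List.getLastD_concat .. , hsl]
  cases hE : PySem.Str.endswith (PySem.Str.strip hd) "*/" <;> simp

-- block mode, no terminator in ls: everything gets buffered
theorem pvFoldB_some_noterm (ls : List String) : ∀ (ms res buf : List String) (gap : Nat) (mid : Bool),
    pvInnerA [] ls = (ms, []) →
    ls.foldl pvStepB (res, gap, some (buf, mid)) =
      (res, gap, some (buf ++ ms, mid && ms.all (fun x => PySem.Str.startswith (PySem.Str.strip x) "*"))) := by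
  induction ls with
  | nil =>
    intro ms res buf gap mid h
    simp only [pvInnerA, Prod.mk.injEq] at h
    obtain ⟨h1, -⟩ := h
    simp [← h1]
  | cons l rest ih =>
    intro ms res buf gap mid h
    rw [pvInnerA] at h
    by_cases hin : PySem.Str.isIn "*/" l = true
    · rw [if_pos hin] at h
      simp at h
    · rw [if_neg hin, List.nil_append, pvInnerA_shift] at h
      cases hre : pvInnerA [] rest with
      | mk ms' rem' =>
        rw [hre] at h
        simp only [Prod.mk.injEq] at h
        obtain ⟨h1, h2⟩ := h
        rw [h2] at hre
        simp only [Bool.not_eq_true] at hin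
        simp only [List.foldl_cons, pvStepB, hin, Bool.false_eq_true, if_false]
        rw [ih ms' res (buf ++ [l]) gap _ hre, ← h1]
        simp [Bool.and_assoc]

-- block mode, terminator hd reached: flush (iff valid) and continue in plain mode
theorem pvFoldB_some_term (ls : List String) : ∀ (ms t res buf : List String) (hd : String) (gap : Nat) (mid : Bool),
    pvInnerA [] ls = (ms, hd :: t) →
    ls.foldl pvStepB (res, gap, some (buf, mid)) =
      t.foldl pvStepB
        (if (mid && ms.all (fun x => PySem.Str.startswith (PySem.Str.strip x) "*")) &&
            PySem.Str.endswith (PySem.Str.strip hd) "*/" then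
          (res ++ (buf ++ ms ++ [hd]), (buf ++ ms ++ [hd]).foldl pvUpd gap, none)
         else (res, gap, none)) := by
  induction ls with
  | nil =>
    intro ms t res buf hd gap mid h
    simp [pvInnerA] at h
  | cons l rest ih =>
    intro ms t res buf hd gap mid h
    rw [pvInnerA] at h
    by_cases hin : PySem.Str.isIn "*/" l = true
    · rw [if_pos hin] at h
      simp only [Prod.mk.injEq, List.cons.injEq] at h
      obtain ⟨h1, h2, h3⟩ := h
      subst h1; subst h2; subst h3
      simp only [List.foldl_cons, pvStepB, hin, if_true]
      simp
    · rw [if_neg hin, List.nil_append, pvInnerA_shift] at h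
      cases hre : pvInnerA [] rest with
      | mk ms' rem' =>
        rw [hre] at h
        simp only [Prod.mk.injEq] at h
        obtain ⟨h1, h2⟩ := h
        rw [h2] at hre
        simp only [Bool.not_eq_true] at hin
        simp only [List.foldl_cons, pvStepB, hin, Bool.false_eq_true, if_false]
        rw [ih ms' t res (buf ++ [l]) hd gap _ hre, ← h1]
        simp [Bool.and_assoc]

theorem pvGFold_append (res : List String) (l : String)
    (h : PySem.Str.startswith (PySem.Str.strip l) "/**" = false) :
    pvGFold (res ++ [l]) = min (pvGFold res + 1) 5 := by
  rw [pvGFold, pvGFold, List.foldl_append]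
  simp only [List.foldl_cons, List.foldl_nil, pvUpd, h, Bool.false_eq_true, if_false]

theorem pvGFold_flush (res block : List String) :
    pvGFold (res ++ block) = block.foldl pvUpd (pvGFold res) := by
  rw [pvGFold, pvGFold, List.foldl_append]

theorem pvLoopA_block_noterm (res : List String) (l : String) (rest c : List String)
    (hs : ¬ PySem.Str.strip l = "") (hb : PySem.Str.startswith (PySem.Str.strip l) "/**" = true)
    (h : pvInnerA [l] rest = (c, [])) : pvLoopA res (l :: rest) = res := by
  rw [pvLoopA, if_neg hs, if_pos hb]
  split
  · rfl
  · next c' hd' t' heq =>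
    rw [h] at heq
    simp at heq

theorem pvLoopA_block_term (res : List String) (l : String) (rest c : List String) (hd : String)
    (t : List String)
    (hs : ¬ PySem.Str.strip l = "") (hb : PySem.Str.startswith (PySem.Str.strip l) "/**" = true)
    (h : pvInnerA [l] rest = (c, hd :: t)) :
    pvLoopA res (l :: rest) =
      pvLoopA (if pvValidBlock (c ++ [hd]) = true then res ++ (c ++ [hd]) else res) t := by
  rw [pvLoopA, if_neg hs, if_pos hb]
  split
  · next fst heq =>
    rw [h] at heq
    simp at heq
  · next c' hd' t' heq =>
    rw [h] at heq
    simp only [Prod.mk.injEq, List.cons.injEq] at heq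
    obtain ⟨h1, h2, h3⟩ := heq
    subst h1; subst h2; subst h3
    rfl

theorem pv_main (n : Nat) : ∀ (ls : List String), ls.length ≤ n → ∀ (res : List String) (gap : Nat),
    gap = pvGFold res → (ls.foldl pvStepB (res, gap, none)).1 = pvLoopA res ls := by
  induction n with
  | zero =>
    intro ls hlen res gap hg
    have : ls = [] := List.length_eq_zero_iff.mp (Nat.le_zero.mp hlen)
    subst this; simp [pvLoopA]
  | succ n ih =>
    intro ls hlen res gap hg
    subst hg
    match ls with
    | [] => simp [pvLoopA]
    | l :: rest =>
      have hrest : rest.length ≤ n := by simp at hlen; omega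
      simp only [List.foldl_cons, pvStepB]
      by_cases hs : PySem.Str.strip l = ""
      · -- blank line: emitted by both
        have hb : PySem.Str.startswith (PySem.Str.strip l) "/**" = false := by
          rw [hs]; decide
        have c1 : ¬(PySem.Str.startswith (PySem.Str.strip l) "/**" = true) := by rw [hb]; simp
        have c2 : (decide (PySem.Str.strip l = "") || PySem.Str.startswith (PySem.Str.strip l) "//") = true := by
          simp [hs]
        rw [if_neg c1, if_pos c2, pvLoopA, if_pos hs]
        exact ih rest hrest (res ++ [l]) _ (pvGFold_append res l hb).symm
      · by_cases hb : PySem.Str.startswith (PySem.Str.strip l) "/**" = true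
        · -- '/**' line: enter block mode
          rw [if_pos hb]
          cases hre : pvInnerA [] rest with
          | mk ms' rem' =>
            have hshift : pvInnerA [l] rest = (l :: ms', rem') := by
              have hsh := pvInnerA_shift rest [l]
              rw [hre] at hsh
              exact hsh
            cases rem' with
            | nil =>
              rw [pvFoldB_some_noterm rest ms' res [l] _ true hre,
                pvLoopA_block_noterm res l rest (l :: ms') hs hb hshift]
            | cons hd t =>
              have ht : t.length ≤ n := by
                have := pvInnerA_snd_length [l] rest
                rw [hshift] at this; simp at this; omega
              rw [pvFoldB_some_term rest ms' t res [l] hd _ true hre,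
                pvLoopA_block_term res l rest (l :: ms') hd t hs hb hshift,
                pvValidBlock_char l hd ms' hb]
              by_cases hcond : (ms'.all (fun x => PySem.Str.startswith (PySem.Str.strip x) "*") &&
                  PySem.Str.endswith (PySem.Str.strip hd) "*/") = true
              · rw [if_pos (by simpa using hcond), if_pos hcond]
                have hblk : (l :: ms') ++ [hd] = [l] ++ ms' ++ [hd] := by simp
                rw [hblk]
                exact ih t ht _ _ (pvGFold_flush res _).symm
              · rw [if_neg (by simpa using hcond), if_neg hcond]
                exact ih t ht res _ rfl
        · simp only [Bool.not_eq_true] at hb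
          have c1 : ¬(PySem.Str.startswith (PySem.Str.strip l) "/**" = true) := by rw [hb]; simp
          by_cases hsl : PySem.Str.startswith (PySem.Str.strip l) "//" = true
          · -- '//' line: emitted by both
            have hb' : PySem.Str.startswith (PySem.Str.strip l) "/**" = false :=
              pvSlash_not_doc hsl
            have c2 : (decide (PySem.Str.strip l = "") || PySem.Str.startswith (PySem.Str.strip l) "//") = true := by
              rw [hsl]; simp
            rw [if_neg c1, if_pos c2, pvLoopA, if_neg hs, if_neg c1, if_pos hsl]
            exact ih rest hrest (res ++ [l]) _ (pvGFold_append res l hb').symm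
          · -- suppress-or-keep
            simp only [Bool.not_eq_true] at hsl
            have c2 : ¬((decide (PySem.Str.strip l = "") || PySem.Str.startswith (PySem.Str.strip l) "//") = true) := by
              rw [hsl]; simp [hs]
            have c3 : ¬(PySem.Str.startswith (PySem.Str.strip l) "//" = true) := by rw [hsl]; simp
            rw [if_neg c1, if_neg c2, pvLoopA, if_neg hs, if_neg c1, if_neg c3, pvLook_eq_gap]
            by_cases hlook : pvGFold res < 5
            · -- a '/**' within the last five emitted lines: both keep the line
              have d1 : ¬(((PySem.Str.isIn "*/" (PySem.Str.strip l) || PySem.Str.startswith (PySem.Str.strip l) "*") &&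
                  decide (5 ≤ pvGFold res)) = true) := by simp; omega
              have d2 : ¬((PySem.Str.isIn "*/" (PySem.Str.strip l) && !decide (pvGFold res < 5)) = true) := by
                simp [hlook]
              have d3 : ¬((PySem.Str.startswith (PySem.Str.strip l) "*" && !decide (pvGFold res < 5)) = true) := by
                simp [hlook]
              rw [if_neg d1, if_neg d2, if_neg d3]
              exact ih rest hrest (res ++ [l]) _ (pvGFold_append res l hb).symm
            · have hl5 : (!decide (pvGFold res < 5)) = true := by simp; omega
              by_cases h1 : PySem.Str.isIn "*/" (PySem.Str.strip l) = true
              · have d1 : ((PySem.Str.isIn "*/" (PySem.Str.strip l) || PySem.Str.startswith (PySem.Str.strip l) "*") &&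
                    decide (5 ≤ pvGFold res)) = true := by rw [h1]; simp; omega
                have d2 : (PySem.Str.isIn "*/" (PySem.Str.strip l) && !decide (pvGFold res < 5)) = true := by
                  rw [h1, hl5]; simp
                rw [if_pos d1, if_pos d2]
                exact ih rest hrest res _ rfl
              · simp only [Bool.not_eq_true] at h1
                have d2 : ¬((PySem.Str.isIn "*/" (PySem.Str.strip l) && !decide (pvGFold res < 5)) = true) := by
                  rw [h1]; simp
                rw [if_neg d2]
                by_cases h2 : PySem.Str.startswith (PySem.Str.strip l) "*" = true
                · have d1 : ((PySem.Str.isIn "*/" (PySem.Str.strip l) || PySem.Str.startswith (PySem.Str.strip l) "*") &&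
                      decide (5 ≤ pvGFold res)) = true := by rw [h1, h2]; simp; omega
                  have d3 : (PySem.Str.startswith (PySem.Str.strip l) "*" && !decide (pvGFold res < 5)) = true := by
                    rw [h2, hl5]; simp
                  rw [if_pos d1, if_pos d3]
                  exact ih rest hrest res _ rfl
                · simp only [Bool.not_eq_true] at h2
                  have d1 : ¬(((PySem.Str.isIn "*/" (PySem.Str.strip l) || PySem.Str.startswith (PySem.Str.strip l) "*") &&
                      decide (5 ≤ pvGFold res)) = true) := by rw [h1, h2]; simp
                  have d3 : ¬((PySem.Str.startswith (PySem.Str.strip l) "*" && !decide (pvGFold res < 5)) = true) := by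
                    rw [h2]; simp
                  rw [if_neg d1, if_neg d3]
                  exact ih rest hrest (res ++ [l]) _ (pvGFold_append res l hb).symm

-- ===== VERDICT (by name: the statement is the Claim_ definition above) =====
theorem clean_java_comments_spec : Claim_equal_clean_java_comments := by
  intro code _
  unfold Spec_clean_java_comments clean_java_comments clean_java_comments_alt
  rw [pv_main ((PySem.Str.split? code "\n").getD []).length _ le_rfl _ 5 rfl]
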